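-- pv_equiv track=rewrite | github.com/walborn/yandex.algorithms | 7/3. Битовые операции, исправляющие коды Хэмминга, сжатие данных/I. Исправление одной ошибки/index.py | remove_control
-- ===== SOURCE A (Python) =====
-- def remove_control(lst):
--   ans = []
--   pow2_pos = 1
--   for i in range(1, len(lst)):
--     if i != pow2_pos:
--       ans.append(lst[i])
--     else:
--       pow2_pos = pow2_pos << 1
--   return ans
-- ===== SOURCE B (Python) =====
-- def remove_control(lst):
--   # The data bits lie in whole blocks between consecutive control positions:
--   # for each power of two p, the slice lst[p+1 : 2*p] is kept verbatim.
--   ans = []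
--   p = 1
--   while p < len(lst):
--     ans += lst[p + 1 : 2 * p]
--     p *= 2
--   return ans
-- ===== Notes on version B (the rewrite author's own statement) =====
-- stated objective: simpler
-- what changed: Instead of scanning every index with a pow2_pos state machine and a per-element if/append, B copies whole data blocks: for each power of two p it extends the answer with the slice lst[p+1:2*p], so only O(log n) loop iterations each doing a bulk slice copy.
import Mathlib
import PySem

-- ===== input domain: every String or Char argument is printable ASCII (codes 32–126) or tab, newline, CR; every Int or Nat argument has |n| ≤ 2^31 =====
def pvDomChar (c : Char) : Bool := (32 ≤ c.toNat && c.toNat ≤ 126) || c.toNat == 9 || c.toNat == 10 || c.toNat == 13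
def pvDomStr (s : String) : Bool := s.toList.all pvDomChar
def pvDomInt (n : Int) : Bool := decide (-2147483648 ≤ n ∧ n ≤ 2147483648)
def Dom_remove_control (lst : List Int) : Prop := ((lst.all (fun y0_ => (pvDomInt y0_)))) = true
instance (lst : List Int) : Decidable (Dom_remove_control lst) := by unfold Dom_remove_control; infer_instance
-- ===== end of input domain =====

-- B replaces A's per-index loop with a state machine by whole-slice copying of the data
-- blocks lst[p+1:2p] between consecutive control positions p = 1,2,4,… (simpler).

-- ===== PORT A =====
-- literal transliteration of A: fold over range(1, len(lst)) carrying (ans, pow2_pos)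
def remove_control (lst : List Int) : List Int :=
  ((PySem.List.pyRange 1 (PySem.List.len lst) 1).foldl
    (fun (s : List Int × Int) i =>
      if i ≠ s.2 then (s.1 ++ [PySem.List.pyGetD lst i 0], s.2)
      else (s.1, s.2 <<< (1 : Nat)))
    ([], 1)).1

-- ===== PORT B =====
-- transliteration of B's while-loop: p doubles, each round extends ans with lst[p+1:2*p].
-- (The '0 < p' conjunct is only a totality guard: Python's loop is entered with p = 1 and
-- p stays positive; for p ≤ 0 the Python loop would not terminate.)
def removeControlLoop (lst : List Int) (ans : List Int) (p : Int) : List Int :=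
  if h : 0 < p ∧ p < PySem.List.len lst then
    removeControlLoop lst (ans ++ PySem.List.slice lst (some (p + 1)) (some (2 * p))) (p * 2)
  else ans
termination_by (PySem.List.len lst - p).toNat
decreasing_by
  simp only [PySem.List.len_eq] at *
  omega

def remove_control_alt (lst : List Int) : List Int :=
  removeControlLoop lst [] 1

-- ===== PRECONDITION & SPEC =====
def Spec_remove_control (lst : List Int) (out : List Int) : Prop := out = remove_control_alt lst
instance (lst : List Int) (out : List Int) : Decidable (Spec_remove_control lst out) := by unfold Spec_remove_control; infer_instance

-- ===== CLAIM (what is proved, stated in full; the proofs are below) =====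
def Claim_equal_remove_control : Prop := ∀ (lst : List Int), Dom_remove_control lst → Spec_remove_control lst (remove_control lst)

-- ===== LEMMAS AND PROOFS =====

-- a segment of indices all different from the current pow2_pos is appended wholesale
theorem fold_all_append (lst : List Int) (P : Int) :
    ∀ (L : List Int) (ans : List Int), (∀ j ∈ L, j ≠ P) →
    L.foldl
      (fun (s : List Int × Int) i =>
        if i ≠ s.2 then (s.1 ++ [PySem.List.pyGetD lst i 0], s.2)
        else (s.1, s.2 <<< (1 : Nat)))
      (ans, P)
    = (ans ++ L.map (fun j => PySem.List.pyGetD lst j 0), P) := by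
  intro L
  induction L with
  | nil => intro ans _; simp
  | cons x L ih =>
    intro ans h
    simp only [List.foldl_cons, List.map_cons]
    rw [if_pos (by simpa using h x (by simp))]
    rw [ih (ans ++ [PySem.List.pyGetD lst x 0]) (fun j hj => h j (by simp [hj]))]
    simp

-- the looked-up segment range(a, min(b, len)) IS the Python slice lst[a:b]
theorem map_seg_eq_slice (lst : List Int) (a b : Int) (ha : 0 ≤ a) (hab : a ≤ b)
    (hal : a ≤ PySem.List.len lst) :
    (PySem.List.pyRange a (min b (PySem.List.len lst)) 1).map
      (fun j => PySem.List.pyGetD lst j 0)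
    = PySem.List.slice lst (some a) (some b) := by
  have hlen : PySem.List.len lst = (lst.length : Int) := PySem.List.len_eq lst
  set m : Int := min b (PySem.List.len lst) with hm
  have h1 : PySem.List.pyRange a (PySem.List.len lst) =
      PySem.List.pyRange a m ++ PySem.List.pyRange m (PySem.List.len lst) := by
    exact PySem.List.pyRange_one_append a m _ (by omega) (by omega)
  have h2 := PySem.List.map_pyGetD_pyRange lst 0 ha
  rw [h1, List.map_append] at h2
  have hlenseg : ((PySem.List.pyRange a m 1).map (fun j => PySem.List.pyGetD lst j 0)).length
      = (m - a).toNat := by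
    rw [List.length_map, PySem.List.length_pyRange_one]
  have h3 : ((PySem.List.pyRange a m 1).map (fun j => PySem.List.pyGetD lst j 0))
      = (lst.drop a.toNat).take (m - a).toNat := by
    rw [← h2, List.take_left' hlenseg]
  rw [h3, PySem.List.slice_toNat lst ha (by omega)]
  rw [List.take_eq_take_iff]
  have := List.length_drop (l := lst) (i := a.toNat)
  omega

-- main correspondence: A's loop from index p with pow2_pos = p equals B's loop at p
theorem loop_eq (lst : List Int) :
    ∀ (c : Nat) (p : Int) (ans : List Int), 1 ≤ p → PySem.List.len lst - p ≤ (c : Int) →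
    ((PySem.List.pyRange p (PySem.List.len lst) 1).foldl
      (fun (s : List Int × Int) i =>
        if i ≠ s.2 then (s.1 ++ [PySem.List.pyGetD lst i 0], s.2)
        else (s.1, s.2 <<< (1 : Nat)))
      (ans, p)).1
    = removeControlLoop lst ans p := by
  intro c
  induction c with
  | zero =>
    intro p ans hp hc
    rw [PySem.List.pyRange_one_eq_nil (by omega),
        removeControlLoop, dif_neg (by simp only [not_and, not_lt]; omega)]
    simp
  | succ c ih =>
    intro p ans hp hc
    by_cases hpl : p < PySem.List.len lst
    · -- one block: index p (skip & double), then indices p+1 .. min(2p, len)-1, then recurse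
      set m : Int := min (2 * p) (PySem.List.len lst) with hm
      rw [PySem.List.pyRange_one_cons hpl,
          PySem.List.pyRange_one_append (p + 1) m _ (by omega) (by omega)]
      simp only [List.foldl_cons, List.foldl_append]
      rw [if_neg (by simp)]
      have hsh : p <<< (1 : Nat) = 2 * p := by rw [Int.shiftLeft_eq]; ring
      rw [hsh, fold_all_append lst (2 * p) _ ans
        (fun j hj => by
          have := (PySem.List.mem_pyRange_one).1 hj
          omega)]
      rw [map_seg_eq_slice lst (p + 1) (2 * p) (by omega) (by omega) (by omega)]
      have hstep : removeControlLoop lst ans p =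
          removeControlLoop lst
            (ans ++ PySem.List.slice lst (some (p + 1)) (some (2 * p))) (p * 2) := by
        rw [removeControlLoop, dif_pos ⟨by omega, hpl⟩]
      rw [hstep, show p * 2 = 2 * p by ring]
      by_cases h2 : 2 * p < PySem.List.len lst
      · have hmm : m = 2 * p := by omega
        rw [hmm]
        exact ih (2 * p) _ (by omega) (by omega)
      · have hmm : m = PySem.List.len lst := by omega
        rw [hmm, PySem.List.pyRange_one_eq_nil (le_refl _)]
        simp only [List.foldl_nil]
        rw [removeControlLoop, dif_neg (by simp only [not_and, not_lt]; omega)]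
    · rw [PySem.List.pyRange_one_eq_nil (by omega),
          removeControlLoop, dif_neg (by simp only [not_and, not_lt]; omega)]
      simp

-- ===== VERDICT (by name: the statement is the Claim_ definition above) =====
theorem remove_control_spec : Claim_equal_remove_control := by
  intro lst _
  unfold Spec_remove_control remove_control remove_control_alt
  exact loop_eq lst (PySem.List.len lst - 1).toNat 1 [] le_rfl (by omega)
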